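-- pv_equiv track=rewrite | github.com/tomer-mil/Extended_Intro_to_CS | HW_6/hw6.py | blocks
-- ===== SOURCE A (Python) =====
-- def blocks(gen, k):
--     sub_lst = []
--     for g in gen:
--         sub_lst.append(g)
--         if len(sub_lst) == k:
--             yield sub_lst
--             sub_lst = []
--
--     if sub_lst != []:
--         yield sub_lst
-- ===== SOURCE B (Python) =====
-- def blocks(gen, k):
--     items = list(gen)
--     for i in range(0, len(items), k):
--         yield items[i:i+k]
-- ===== Notes on version B (the rewrite author's own statement) =====
-- stated objective: faster
-- what changed: B materializes the input once and yields slices items[i:i+k] over range(0, len, k) (bulk slicing, no per-element append/length test) instead of A's element-by-element accumulation with a flush at length k; Pre_ excludes k <= 0, where a block size is meaningless: B's range raises ValueError at k = 0, and for negative k neither A's accidental single block of everything nor B's empty output is a specified behaviour.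
-- outside the precondition, e.g. on blocks([1], 0): A returns [[1]], B raises ValueError; on blocks([1, 2], -1): A returns [[1, 2]], B returns []
import Mathlib
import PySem

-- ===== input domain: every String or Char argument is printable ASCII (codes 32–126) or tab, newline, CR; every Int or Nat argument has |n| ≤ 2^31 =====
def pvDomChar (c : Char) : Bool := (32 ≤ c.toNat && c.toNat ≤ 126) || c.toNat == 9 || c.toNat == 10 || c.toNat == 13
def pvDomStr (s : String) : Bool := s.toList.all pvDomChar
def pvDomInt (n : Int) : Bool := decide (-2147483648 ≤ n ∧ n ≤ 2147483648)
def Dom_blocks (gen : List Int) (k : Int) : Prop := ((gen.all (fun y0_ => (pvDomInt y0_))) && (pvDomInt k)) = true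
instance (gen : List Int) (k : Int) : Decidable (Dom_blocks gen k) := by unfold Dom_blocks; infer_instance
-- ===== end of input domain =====

-- B yields slices of the materialized list over range(0, len, k) instead of A's
-- element-by-element accumulation with a flush at length k (objective: idiomatic).

-- ===== PORT A =====
-- one iteration of A's for-loop: append g, flush when the buffer reaches length k
def blocksStep (k : Int) (st : List (List Int) × List Int) (g : Int) : List (List Int) × List Int :=
  let sub := st.2 ++ [g]
  if (sub.length : Int) = k then (st.1 ++ [sub], []) else (st.1, sub)

-- final 'if sub_lst != []: yield sub_lst'
def blocksFin (st : List (List Int) × List Int) : List (List Int) :=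
  if st.2 ≠ [] then st.1 ++ [st.2] else st.1

def blocks (gen : List Int) (k : Int) : List (List Int) :=
  blocksFin (gen.foldl (blocksStep k) ([], []))

-- ===== PORT B =====
def blocks_alt (gen : List Int) (k : Int) : List (List Int) :=
  (PySem.List.pyRange 0 (gen.length : Int) k).map
    (fun i => PySem.List.slice gen (some i) (some (i + k)))

-- ===== PRECONDITION & SPEC =====
-- Pre_ excludes k ≤ 0, on which A still returns: a block size is meaningless there —
-- B's range raises ValueError at k = 0, and for negative k neither A's accidental
-- single block of everything nor B's empty output is a specified behaviour.
def Pre_blocks (gen : List Int) (k : Int) : Prop := 1 ≤ k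
instance (gen : List Int) (k : Int) : Decidable (Pre_blocks gen k) := by unfold Pre_blocks; infer_instance
def pvWitness_blocks : List Int × Int := ([1, 2, 3], 2)

def Spec_blocks (gen : List Int) (k : Int) (out : List (List Int)) : Prop := out = blocks_alt gen k
instance (gen : List Int) (k : Int) (out : List (List Int)) : Decidable (Spec_blocks gen k out) := by unfold Spec_blocks; infer_instance

-- ===== CLAIM (what is proved, stated in full; the proofs are below) =====
def Claim_equal_blocks : Prop := ∀ (gen : List Int) (k : Int), Dom_blocks gen k → Pre_blocks gen k → Spec_blocks gen k (blocks gen k)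

-- ===== LEMMAS AND PROOFS =====

-- reference chunking: blocks of size k'+1, last one partial
def pvChunk (k' : Nat) : List Int → List (List Int)
  | [] => []
  | x :: xs => ((x :: xs).take (k' + 1)) :: pvChunk k' ((x :: xs).drop (k' + 1))
  termination_by l => l.length
  decreasing_by simp

theorem pvChunk_nil (k' : Nat) : pvChunk k' [] = [] := by rw [pvChunk.eq_def]

theorem pvChunk_cons (k' : Nat) (l : List Int) (h : l ≠ []) :
    pvChunk k' l = l.take (k' + 1) :: pvChunk k' (l.drop (k' + 1)) := by
  cases l with
  | nil => exact absurd rfl h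
  | cons x xs => rw [pvChunk.eq_def]

theorem pyRange_pos_nil (a b s : Int) (h : b ≤ a) (hs : 0 < s) :
    PySem.List.pyRange a b s = [] := by
  rw [PySem.List.pyRange_of_pos _ _ hs, if_neg (by omega : ¬ a < b)]
  simp

theorem pyRange_pos_cons (a b s : Int) (hab : a < b) (hs : 0 < s) :
    PySem.List.pyRange a b s = a :: PySem.List.pyRange (a + s) b s := by
  rw [PySem.List.pyRange_of_pos _ _ hs, PySem.List.pyRange_of_pos _ _ hs]
  have hdiv : (b - a + s - 1) / s = (b - a - 1) / s + 1 := by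
    have h1 : b - a + s - 1 = (b - a - 1) + 1 * s := by ring
    rw [h1, Int.add_mul_ediv_right _ _ (by omega : s ≠ 0)]
  have hq0 : 0 ≤ (b - a - 1) / s := Int.ediv_nonneg (by omega) (by omega)
  have hN : ((b - a + s - 1) / s).toNat = ((b - a - 1) / s).toNat + 1 := by
    rw [hdiv]; omega
  by_cases h2 : a + s < b
  · have hd2 : (b - (a + s) + s - 1) / s = (b - a - 1) / s := by ring_nf
    simp only [if_pos hab, if_pos h2, hN, hd2]
    rw [List.range_succ_eq_map]
    simp only [List.map_cons, List.map_map]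
    congr 1
    · push_cast; ring
    · apply List.map_congr_left
      intro x _
      simp only [Function.comp_apply]
      push_cast
      ring
  · have hz : (b - a - 1) / s = 0 :=
      Int.ediv_eq_zero_of_lt (by omega) (by omega)
    simp only [if_pos hab, if_neg h2, hN, hz]
    simp

theorem A_loop (k : Int) (k' : Nat) (hk : k = (k' : Int) + 1) :
    ∀ (gen : List Int) (out : List (List Int)) (sub : List Int), sub.length ≤ k' →
      blocksFin (gen.foldl (blocksStep k) (out, sub)) = out ++ pvChunk k' (sub ++ gen) := by
  intro gen
  induction gen with
  | nil =>
    intro out sub hlen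
    simp only [List.foldl_nil, List.append_nil]
    cases sub with
    | nil => simp [blocksFin, pvChunk]
    | cons x xs =>
      rw [pvChunk]
      have hl : (x :: xs).length ≤ k' + 1 := Nat.le_succ_of_le hlen
      have ht : (x :: xs).take (k' + 1) = x :: xs := List.take_of_length_le hl
      have hd : (x :: xs).drop (k' + 1) = [] := List.drop_eq_nil_of_le hl
      simp [blocksFin, ht, hd, pvChunk_nil]
  | cons g gs ih =>
    intro out sub hlen
    simp only [List.foldl_cons]
    by_cases hfull : sub.length = k'
    · have hcond : (sub.length : Int) + 1 = k := by omega
      rw [show blocksStep k (out, sub) g = (out ++ [sub ++ [g]], []) from by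
        simp [blocksStep, hcond]]
      rw [ih (out ++ [sub ++ [g]]) [] (Nat.zero_le k')]
      rw [show sub ++ g :: gs = (sub ++ [g]) ++ gs from by simp]
      rw [pvChunk_cons k' ((sub ++ [g]) ++ gs) (by simp)]
      have hlg : (sub ++ [g]).length = k' + 1 := by simp [hfull]
      rw [List.take_left' hlg, List.drop_left' hlg]
      simp
    · have hcond : ¬ ((sub.length : Int) + 1 = k) := by omega
      rw [show blocksStep k (out, sub) g = (out, sub ++ [g]) from by
        simp [blocksStep, hcond]]
      rw [ih out (sub ++ [g]) (by simp; omega)]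
      simp

theorem B_loop (k : Int) (k' : Nat) (hk : k = (k' : Int) + 1) (items : List Int) :
    ∀ (n : Nat) (i : Int), 0 ≤ i → items.length - i.toNat ≤ n →
      (PySem.List.pyRange i (items.length : Int) k).map
          (fun j => PySem.List.slice items (some j) (some (j + k)))
        = pvChunk k' (items.drop i.toNat) := by
  intro n
  induction n with
  | zero =>
    intro i hi hn
    have hle : (items.length : Int) ≤ i := by omega
    rw [pyRange_pos_nil _ _ _ hle (by omega)]
    have : items.drop i.toNat = [] := List.drop_eq_nil_of_le (by omega)
    simp [this, pvChunk_nil]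
  | succ n ih =>
    intro i hi hn
    by_cases hend : (items.length : Int) ≤ i
    · rw [pyRange_pos_nil _ _ _ hend (by omega)]
      have : items.drop i.toNat = [] := List.drop_eq_nil_of_le (by omega)
      simp [this, pvChunk_nil]
    · have hlt : i < (items.length : Int) := by omega
      rw [pyRange_pos_cons _ _ _ hlt (by omega)]
      rw [List.map_cons]
      have hslice : PySem.List.slice items (some i) (some (i + k))
          = (items.drop i.toNat).take (k' + 1) := by
        rw [PySem.List.slice_toNat items hi (by omega)]
        congr 1
        omega
      have hdropne : items.drop i.toNat ≠ [] := by
        intro h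
        have := List.drop_eq_nil_iff.mp h
        omega
      rw [pvChunk_cons k' _ hdropne, hslice]
      congr 1
      rw [List.drop_drop]
      have harg : i.toNat + (k' + 1) = (i + k).toNat := by omega
      rw [harg]
      exact ih (i + k) (by omega) (by omega)

-- ===== VERDICT (by name: the statement is the Claim_ definition above) =====
theorem blocks_spec : Claim_equal_blocks := by
  intro gen k _hdom hpre
  unfold Spec_blocks blocks blocks_alt
  have hk : ¬ k ≤ 0 := by unfold Pre_blocks at hpre; omega
  set k' : Nat := (k - 1).toNat with hk'
  have hkk : k = (k' : Int) + 1 := by omega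
  rw [A_loop k k' hkk gen [] [] (by simp)]
  rw [B_loop k k' hkk gen gen.length 0 (by omega) (by omega)]
  simp
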